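-- pv_equiv track=rewrite | github.com/DavideNuzzi/MDL_Grammar_Induction | grammar_models.py | replace_symbols
-- ===== SOURCE A (Python) =====
-- def replace_symbols(sequence, rule):
--
--     # The rule is a tuple like (rule_name, rule_n_gram)
--     new_symbol, n_gram = rule
--     n_gram = list(n_gram)
--     n = len(n_gram)
--
--     sequence_new = []
--
--     # Repeat until the end of the sequence
--     i = 0
--     while i < len(sequence):
--
--         # Check if there's enough space
--         if i <= len(sequence) - n:
--             # Check if there's a match
--             if sequence[i:(i+n)] == n_gram:
--                 sequence_new.append(new_symbol)
--                 i += n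
--             else:
--                 sequence_new.append(sequence[i])
--                 i += 1
--         else:
--             sequence_new.append(sequence[i])
--             i += 1
--
--     return sequence_new
-- ===== SOURCE B (Python) =====
-- def replace_symbols(sequence, rule):
--     new_symbol, n_gram = rule
--     n_gram = list(n_gram)
--     n = len(n_gram)
--     if n == 0:
--         return list(sequence)
--     # phase 1: collect the start indices of the greedy non-overlapping matches
--     positions = []
--     i = 0
--     while i <= len(sequence) - n:
--         if sequence[i:i + n] == n_gram:
--             positions.append(i)
--             i += n
--         else:
--             i += 1
--     # phase 2: splice the untouched stretches around one new_symbol per match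
--     out = []
--     prev = 0
--     for p in positions:
--         out.extend(sequence[prev:p])
--         out.append(new_symbol)
--         prev = p + n
--     out.extend(sequence[prev:])
--     return out
-- ===== Notes on version B (the rewrite author's own statement) =====
-- stated objective: alternative
-- what changed: A interleaves matching and copying in one while-loop that appends element by element; B first collects the start indices of the greedy non-overlapping matches in one scan, then assembles the output by splicing the untouched slices (bulk list slices) around one new symbol per match; B also returns a copy of the sequence early for an empty n-gram, where A loops forever (excluded by Pre_).
import Mathlib
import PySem

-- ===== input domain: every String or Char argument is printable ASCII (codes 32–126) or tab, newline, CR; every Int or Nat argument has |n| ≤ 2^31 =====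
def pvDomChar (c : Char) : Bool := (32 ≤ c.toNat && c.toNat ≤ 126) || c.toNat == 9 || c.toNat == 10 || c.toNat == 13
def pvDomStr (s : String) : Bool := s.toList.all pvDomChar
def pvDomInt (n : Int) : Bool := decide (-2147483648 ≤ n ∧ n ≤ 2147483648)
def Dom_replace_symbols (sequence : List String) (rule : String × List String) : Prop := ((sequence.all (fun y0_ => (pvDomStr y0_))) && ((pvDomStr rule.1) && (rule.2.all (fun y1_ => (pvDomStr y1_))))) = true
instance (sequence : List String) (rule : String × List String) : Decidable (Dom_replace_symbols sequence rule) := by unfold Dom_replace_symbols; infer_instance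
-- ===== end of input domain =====

-- B replaces A's single interleaved scan-and-copy loop by two phases (collect greedy match
-- start indices, then splice the untouched slices around the new symbols); objective: alternative.

-- ===== PORT A =====
-- A's while-loop; i increases by at least 1 per iteration when the n-gram is nonempty,
-- so fuel = sequence.length covers every terminating run (Pre_ excludes the diverging case).
def pvGoA (seq ngram : List String) (sym : String) (n : Nat) : Nat → Nat → List String → List String
  | 0, _, acc => acc
  | fuel + 1, i, acc =>
    if i < seq.length then
      if (i : Int) ≤ (seq.length : Int) - (n : Int) then
        if PySem.List.slice seq (some (i : Int)) (some ((i : Int) + (n : Int))) = ngram then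
          pvGoA seq ngram sym n fuel (i + n) (acc ++ [sym])
        else
          pvGoA seq ngram sym n fuel (i + 1) (acc ++ [PySem.List.pyGetD seq (i : Int) ""])
      else
        pvGoA seq ngram sym n fuel (i + 1) (acc ++ [PySem.List.pyGetD seq (i : Int) ""])
    else acc

def replace_symbols (sequence : List String) (rule : String × List String) : List String :=
  pvGoA sequence rule.2 rule.1 rule.2.length sequence.length 0 []

-- ===== PORT B =====
-- phase 1 of Source B: the start indices of the greedy non-overlapping matches
def pvGoPos (seq ngram : List String) (n : Nat) : Nat → Nat → List Nat → List Nat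
  | 0, _, ps => ps
  | fuel + 1, i, ps =>
    if (i : Int) ≤ (seq.length : Int) - (n : Int) then
      if PySem.List.slice seq (some (i : Int)) (some ((i : Int) + (n : Int))) = ngram then
        pvGoPos seq ngram n fuel (i + n) (ps ++ [i])
      else
        pvGoPos seq ngram n fuel (i + 1) ps
    else ps

-- phase 2 of Source B: splice the untouched stretches around one new symbol per match
def pvAssemble (seq : List String) (sym : String) (n : Nat) : List Nat → List String → Nat → List String
  | [], out, prev => out ++ PySem.List.slice seq (some (prev : Int)) none
  | p :: ps, out, prev =>
      pvAssemble seq sym n ps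
        (out ++ PySem.List.slice seq (some (prev : Int)) (some (p : Int)) ++ [sym]) (p + n)

def replace_symbols_alt (sequence : List String) (rule : String × List String) : List String :=
  let n := rule.2.length
  if n = 0 then sequence
  else pvAssemble sequence rule.1 n (pvGoPos sequence rule.2 n (sequence.length + 1) 0 []) [] 0

-- ===== PRECONDITION & SPEC =====
-- Pre_ excludes an empty n-gram with a nonempty sequence: there A's while-loop never
-- advances (i += 0 on a match of the empty slice) and loops forever, returning nothing.
def Pre_replace_symbols (sequence : List String) (rule : String × List String) : Prop :=
  rule.2 ≠ [] ∨ sequence = []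
instance (sequence : List String) (rule : String × List String) : Decidable (Pre_replace_symbols sequence rule) := by unfold Pre_replace_symbols; infer_instance

def pvWitness_replace_symbols : List String × (String × List String) :=
  (["a", "b", "a", "b", "c"], ("X", ["a", "b"]))

def Spec_replace_symbols (sequence : List String) (rule : String × List String) (out : List String) : Prop := out = replace_symbols_alt sequence rule
instance (sequence : List String) (rule : String × List String) (out : List String) : Decidable (Spec_replace_symbols sequence rule out) := by unfold Spec_replace_symbols; infer_instance

-- ===== CLAIM (what is proved, stated in full; the proofs are below) =====
def Claim_equal_replace_symbols : Prop := ∀ (sequence : List String) (rule : String × List String), Dom_replace_symbols sequence rule → Pre_replace_symbols sequence rule → Spec_replace_symbols sequence rule (replace_symbols sequence rule)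

-- ===== LEMMAS AND PROOFS =====

-- tail copy: once no further match can fit, A's loop copies the rest of the sequence
theorem pvGoA_tail (seq ngram : List String) (sym : String) (n : Nat) :
    ∀ (fuel i : Nat) (acc : List String),
      (seq.length : Int) - (n : Int) < (i : Int) → seq.length ≤ i + fuel →
      pvGoA seq ngram sym n fuel i acc = acc ++ seq.drop i := by
  intro fuel
  induction fuel with
  | zero =>
      intro i acc _ h2
      rw [show pvGoA seq ngram sym n 0 i acc = acc from rfl,
        List.drop_of_length_le (by omega : seq.length ≤ i), List.append_nil]
  | succ fuel ih =>
      intro i acc h1 h2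
      by_cases hi : i < seq.length
      · rw [pvGoA, if_pos hi, if_neg (by omega)]
        rw [ih (i + 1) _ (by push_cast; omega) (by omega)]
        have hidx : seq.drop i = seq[i] :: seq.drop (i + 1) := List.drop_eq_getElem_cons hi
        rw [PySem.List.pyGetD_natCast, hidx, List.getD_eq_getElem _ _ hi]
        simp
      · rw [pvGoA, if_neg hi,
          List.drop_of_length_le (by omega : seq.length ≤ i), List.append_nil]

-- accumulator of phase 1 is a pure prefix
theorem pvGoPos_acc (seq ngram : List String) (n : Nat) :
    ∀ (fuel i : Nat) (ps : List Nat),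
      pvGoPos seq ngram n fuel i ps = ps ++ pvGoPos seq ngram n fuel i [] := by
  intro fuel
  induction fuel with
  | zero => intro i ps; simp [pvGoPos]
  | succ fuel ih =>
      intro i ps
      rw [pvGoPos, pvGoPos]
      split
      · split
        · rw [ih _ (ps ++ [i]), ih _ ([] ++ [i])]; simp
        · rw [ih _ ps]
      · simp

-- every collected position is at least the scan start
theorem pvGoPos_ge (seq ngram : List String) (n : Nat) :
    ∀ (fuel i : Nat) (p : Nat), p ∈ pvGoPos seq ngram n fuel i [] → i ≤ p := by
  intro fuel
  induction fuel with
  | zero => intro i p hp; simp [pvGoPos] at hp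
  | succ fuel ih =>
      intro i p hp
      rw [pvGoPos] at hp
      split at hp
      · split at hp
        · rw [pvGoPos_acc] at hp
          simp at hp
          rcases hp with h | h
          · omega
          · have := ih (i + n) p h; omega
        · have := ih (i + 1) p hp; omega
      · simp at hp

-- emitting one untouched element now or inside the next slice is the same
theorem pvAssemble_shift (seq : List String) (sym : String) (n : Nat)
    (ps : List Nat) (acc : List String) (i : Nat) (hi : i < seq.length)
    (hall : ∀ p ∈ ps, i + 1 ≤ p) :
    pvAssemble seq sym n ps acc i =
      pvAssemble seq sym n ps (acc ++ [seq[i]'hi]) (i + 1) := by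
  have hidx : seq.drop i = seq[i]'hi :: seq.drop (i + 1) := List.drop_eq_getElem_cons hi
  cases ps with
  | nil =>
      rw [pvAssemble, pvAssemble, PySem.List.slice_from_natCast,
        PySem.List.slice_from_natCast, hidx]
      simp
  | cons p rest =>
      have hp : i + 1 ≤ p := hall p (by simp)
      have hsplit : PySem.List.slice seq (some (i : Int)) (some (p : Int)) =
          seq[i]'hi :: PySem.List.slice seq (some ((i + 1 : Nat) : Int)) (some (p : Int)) := by
        rw [PySem.List.slice_natCast, PySem.List.slice_natCast, hidx,
          (by omega : p - i = (p - (i + 1)) + 1), List.take_succ_cons]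
      rw [pvAssemble, pvAssemble, hsplit]
      simp

-- main loop correspondence: A's loop from i equals B's splice of the positions from i
theorem pvMain (seq ngram : List String) (sym : String) (n : Nat) (hn : 1 ≤ n) :
    ∀ (fuelA fuelB i : Nat) (acc : List String),
      seq.length ≤ i + fuelA → seq.length + 1 ≤ i + fuelB → i ≤ seq.length →
      pvGoA seq ngram sym n fuelA i acc =
        pvAssemble seq sym n (pvGoPos seq ngram n fuelB i []) acc i := by
  intro fuelA
  induction fuelA with
  | zero =>
      intro fuelB i acc hA hB hi
      obtain ⟨fB, rfl⟩ : ∃ fB, fuelB = fB + 1 := ⟨fuelB - 1, by omega⟩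
      rw [pvGoPos, if_neg (by omega)]
      rw [show pvGoA seq ngram sym n 0 i acc = acc from rfl]
      simp [pvAssemble, PySem.List.slice_from_natCast,
        List.drop_of_length_le (by omega : seq.length ≤ i)]
  | succ fuelA ih =>
      intro fuelB i acc hA hB hi
      obtain ⟨fB, rfl⟩ : ∃ fB, fuelB = fB + 1 := ⟨fuelB - 1, by omega⟩
      by_cases hsp : (i : Int) ≤ (seq.length : Int) - (n : Int)
      · have hilt : i < seq.length := by omega
        rw [pvGoA, if_pos hilt, if_pos hsp, pvGoPos, if_pos hsp]
        by_cases hm : PySem.List.slice seq (some (i : Int)) (some ((i : Int) + (n : Int))) = ngram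
        · rw [if_pos hm, if_pos hm, pvGoPos_acc, List.nil_append]
          have hps : pvAssemble seq sym n (i :: pvGoPos seq ngram n fB (i + n) []) acc i =
              pvAssemble seq sym n (pvGoPos seq ngram n fB (i + n) []) (acc ++ [sym]) (i + n) := by
            simp [pvAssemble, PySem.List.slice_natCast]
          rw [show [i] ++ pvGoPos seq ngram n fB (i + n) [] =
            i :: pvGoPos seq ngram n fB (i + n) [] from rfl, hps]
          exact ih fB (i + n) (acc ++ [sym]) (by omega) (by omega) (by omega)
        · rw [if_neg hm, if_neg hm]
          rw [ih fB (i + 1) _ (by omega) (by omega) (by omega)]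
          rw [pvAssemble_shift seq sym n _ acc i hilt
            (fun p hp => by have := pvGoPos_ge seq ngram n fB (i + 1) p hp; omega)]
          rw [PySem.List.pyGetD_natCast, List.getD_eq_getElem _ _ hilt]
      · rw [pvGoPos, if_neg hsp]
        rw [pvGoA_tail seq ngram sym n (fuelA + 1) i acc (by omega) (by omega)]
        simp [pvAssemble, PySem.List.slice_from_natCast]

-- ===== VERDICT (by name: the statement is the Claim_ definition above) =====
theorem replace_symbols_spec : Claim_equal_replace_symbols := by
  intro sequence rule _ hpre
  unfold Spec_replace_symbols replace_symbols replace_symbols_alt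
  by_cases hng : rule.2 = []
  · have hseq : sequence = [] := by
      rcases hpre with h | h
      · exact absurd hng h
      · exact h
    subst hseq
    rw [show pvGoA [] rule.2 rule.1 rule.2.length ([] : List String).length 0 [] = [] from rfl]
    simp [hng]
  · have hn : 1 ≤ rule.2.length := by
      cases h : rule.2 with
      | nil => exact absurd h hng
      | cons a l => simp
    rw [if_neg (by omega)]
    exact pvMain sequence rule.2 rule.1 rule.2.length hn sequence.length (sequence.length + 1)
      0 [] (by omega) (by omega) (by omega)
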